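-- pv_equiv track=rewrite | github.com/daanbrugmans/ru-archive | ru-text-and-multimedia-mining-23-24/Assignments/Assignment 4/code/featurizer.py | get_cont_punct_count
-- ===== SOURCE A (Python) =====
-- import string
--
-- def get_cont_punct_count(tokens: list) -> int:
--     """Count how many times conitious punctuation occurs"""
--     count = 0
--     current_len = 1
--     for i in range(1, len(tokens)):
--         token = tokens[i]
--         if token not in string.punctuation:
--             if current_len > 1:
--                 count += 1
--                 current_len = 1
--         elif tokens[i - 1] in string.punctuation:
--             current_len += 1
--     if current_len > 1:
--         count += 1
--     return count
-- ===== SOURCE B (Python) =====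
-- import string
--
-- def get_cont_punct_count(tokens: list) -> int:
--     """Count how many times conitious punctuation occurs"""
--     # Phase 1: run-length encode the token stream by punctuation-ness.
--     runs = []
--     for t in tokens:
--         k = t in string.punctuation
--         if runs and runs[-1][0] == k:
--             runs[-1][1] += 1
--         else:
--             runs.append([k, 1])
--     # Phase 2: count punctuation runs of length >= 2.
--     return sum(1 for k, n in runs if k and n >= 2)
-- ===== Notes on version B (the rewrite author's own statement) =====
-- stated objective: alternative
-- what changed: Replaces A's stateful index loop (prev/current comparison with a running length counter and in-loop resets) by a two-phase groupby-style pipeline: first run-length encode the token stream by punctuation-ness, then count punctuation runs of length >= 2.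
import Mathlib
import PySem

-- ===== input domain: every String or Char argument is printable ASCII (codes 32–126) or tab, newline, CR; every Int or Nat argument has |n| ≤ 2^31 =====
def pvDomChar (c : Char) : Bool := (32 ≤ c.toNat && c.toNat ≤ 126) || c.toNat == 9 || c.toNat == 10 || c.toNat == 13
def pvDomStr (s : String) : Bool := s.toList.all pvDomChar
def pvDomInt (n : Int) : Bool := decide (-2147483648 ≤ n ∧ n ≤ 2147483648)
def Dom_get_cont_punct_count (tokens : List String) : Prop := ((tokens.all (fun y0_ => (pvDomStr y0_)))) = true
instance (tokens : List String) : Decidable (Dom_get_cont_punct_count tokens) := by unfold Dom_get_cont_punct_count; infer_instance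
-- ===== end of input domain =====

-- B replaces A's stateful index loop by a two-phase pipeline (run-length encode, then
-- count punctuation runs of length ≥ 2); alternative decomposition, same cost.

-- string.punctuation; `t in string.punctuation` is Python substring membership.
def pvPunct : String := "!\"#$%&'()*+,-./:;<=>?@[\\]^_`{|}~"
def pvIsPunct (t : String) : Bool := PySem.Str.isIn t pvPunct

-- ===== PORT A =====
def get_cont_punct_count (tokens : List String) : Int :=
  let st := (PySem.List.pyRange 1 (tokens.length) 1).foldl
    (fun (st : Int × Int) i =>
      -- tokens[i] / tokens[i-1]: i runs over range(1, len(tokens)), always in range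
      let token := PySem.List.pyGetD tokens i ""
      if !(pvIsPunct token) then
        (if st.2 > 1 then (st.1 + 1, 1) else st)
      else if pvIsPunct (PySem.List.pyGetD tokens (i - 1) "") then
        (st.1, st.2 + 1)
      else st) (0, 1)
  if st.2 > 1 then st.1 + 1 else st.1

-- ===== PORT B =====
def get_cont_punct_count_alt (tokens : List String) : Int :=
  let runs := tokens.foldl
    (fun (runs : List (Bool × Int)) t =>
      let k := pvIsPunct t
      match runs.getLast? with
      | some (k', n) => if k' == k then runs.dropLast ++ [(k', n + 1)] else runs ++ [(k, 1)]
      | none => runs ++ [(k, 1)]) []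
  ((runs.filter (fun r => r.1 && decide (2 ≤ r.2))).length : Int)

-- ===== PRECONDITION & SPEC =====
def Spec_get_cont_punct_count (tokens : List String) (out : Int) : Prop := out = get_cont_punct_count_alt tokens
instance (tokens : List String) (out : Int) : Decidable (Spec_get_cont_punct_count tokens out) := by unfold Spec_get_cont_punct_count; infer_instance

-- ===== CLAIM (what is proved, stated in full; the proofs are below) =====
def Claim_equal_get_cont_punct_count : Prop := ∀ (tokens : List String), Dom_get_cont_punct_count tokens → Spec_get_cont_punct_count tokens (get_cont_punct_count tokens)

-- ===== LEMMAS AND PROOFS =====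

-- A's loop step, written on the resolved tokens (prev = tokens[i-1], t = tokens[i]).
def pvStep (st : Int × Int) (prev t : String) : Int × Int :=
  if !(pvIsPunct t) then (if st.2 > 1 then (st.1 + 1, 1) else st)
  else if pvIsPunct prev then (st.1, st.2 + 1)
  else st

-- A's loop as structural recursion over the suffix after `prev`.
def pvFoldA (st : Int × Int) (prev : String) : List String → Int × Int
  | [] => st
  | t :: ts => pvFoldA (pvStep st prev t) t ts

-- B's loop step (definitionally the lambda in get_cont_punct_count_alt).
def pvStepB (runs : List (Bool × Int)) (t : String) : List (Bool × Int) :=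
  let k := pvIsPunct t
  match runs.getLast? with
  | some (k', n) => if k' == k then runs.dropLast ++ [(k', n + 1)] else runs ++ [(k, 1)]
  | none => runs ++ [(k, 1)]

-- B's runs list with a pending run (k, n) in front (merging with an equal-keyed first run).
def pvMergeRuns (k : Bool) (n : Int) : List String → List (Bool × Int)
  | [] => [(k, n)]
  | t :: ts => if pvIsPunct t == k then pvMergeRuns k (n + 1) ts
               else (k, n) :: pvMergeRuns (pvIsPunct t) 1 ts

def pvCntM (k : Bool) (n : Int) (ts : List String) : Int :=
  (((pvMergeRuns k n ts).filter (fun r => r.1 && decide (2 ≤ r.2))).length : Int)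

theorem pvCntM_nil (k : Bool) (n : Int) :
    pvCntM k n [] = if k = true ∧ 2 ≤ n then 1 else 0 := by
  cases k
  · simp [pvCntM, pvMergeRuns, List.filter]
  · by_cases h2 : (2:Int) ≤ n <;> simp [pvCntM, pvMergeRuns, List.filter, h2]

theorem pvCntM_cons_eq (k : Bool) (n : Int) (t : String) (ts : List String)
    (h : pvIsPunct t = k) : pvCntM k n (t :: ts) = pvCntM k (n + 1) ts := by
  simp [pvCntM, pvMergeRuns, h]

theorem pvCntM_cons_ne (k : Bool) (n : Int) (t : String) (ts : List String)
    (h : pvIsPunct t ≠ k) :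
    pvCntM k n (t :: ts) = (if k = true ∧ 2 ≤ n then 1 else 0) + pvCntM (pvIsPunct t) 1 ts := by
  have hb : (pvIsPunct t == k) = false := by simpa using h
  simp only [pvCntM, pvMergeRuns, hb, Bool.false_eq_true, if_false, List.filter]
  cases k
  · simp
  · by_cases h2 : (2:Int) ≤ n
    · simp only [h2, decide_true, Bool.and_true]
      simp [add_comm]
    · simp [h2]

-- The length of a pending non-punctuation run never matters for the count.
theorem pvCntM_false (ts : List String) : ∀ (n m : Int), pvCntM false n ts = pvCntM false m ts := by
  induction ts with
  | nil => intro n m; simp [pvCntM_nil]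
  | cons t ts ih =>
    intro n m
    cases h : pvIsPunct t
    · rw [pvCntM_cons_eq false n t ts h, pvCntM_cons_eq false m t ts h]
      exact ih (n + 1) (m + 1)
    · rw [pvCntM_cons_ne false n t ts (by simp [h]), pvCntM_cons_ne false m t ts (by simp [h])]
      simp

theorem pvStepB_concat (rs : List (Bool × Int)) (k : Bool) (n : Int) (t : String) :
    pvStepB (rs ++ [(k, n)]) t =
      if pvIsPunct t = k then rs ++ [(k, n + 1)] else (rs ++ [(k, n)]) ++ [(pvIsPunct t, 1)] := by
  simp only [pvStepB, List.getLast?_concat, List.dropLast_concat]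
  by_cases h : pvIsPunct t = k
  · simp [h]
  · have hb : (k == pvIsPunct t) = false := by
      cases k <;> cases hpt : pvIsPunct t <;> simp_all
    simp [hb, h]

-- B's foldl grows the runs list from a nonempty accumulator exactly as pvMergeRuns describes.
theorem pvFoldB_eq (ts : List String) : ∀ (rs : List (Bool × Int)) (k : Bool) (n : Int),
    ts.foldl pvStepB (rs ++ [(k, n)]) = rs ++ pvMergeRuns k n ts := by
  induction ts with
  | nil => intro rs k n; simp [pvMergeRuns]
  | cons t ts ih =>
    intro rs k n
    rw [List.foldl_cons, pvStepB_concat]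
    by_cases h : pvIsPunct t = k
    · rw [if_pos h, ih rs k (n + 1)]
      simp [pvMergeRuns, h]
    · rw [if_neg h, ih (rs ++ [(k, n)]) (pvIsPunct t) 1]
      have hb : (pvIsPunct t == k) = false := by simpa using h
      simp [pvMergeRuns, hb]

-- A's loop, finished, counts exactly B's runs (under A's loop invariant on the state).
theorem pvFoldA_eq (ts : List String) : ∀ (prev : String) (c cl : Int), 1 ≤ cl →
    (pvIsPunct prev = false → cl = 1) →
    (if (pvFoldA (c, cl) prev ts).2 > 1 then (pvFoldA (c, cl) prev ts).1 + 1
     else (pvFoldA (c, cl) prev ts).1) = c + pvCntM (pvIsPunct prev) cl ts := by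
  induction ts with
  | nil =>
    intro prev c cl h1 h2
    simp only [pvFoldA, pvCntM_nil]
    cases hp : pvIsPunct prev
    · have hcl : cl = 1 := h2 hp
      subst hcl; simp
    · by_cases hcl : (2:Int) ≤ cl
      · rw [if_pos (by omega), if_pos ⟨rfl, hcl⟩]
      · rw [if_neg (by omega), if_neg (fun h => absurd h.2 hcl)]
        omega
  | cons t ts ih =>
    intro prev c cl h1 h2
    simp only [pvFoldA]
    cases ht : pvIsPunct t
    · -- current token is not punctuation
      cases hp : pvIsPunct prev
      · have hcl : cl = 1 := h2 hp
        subst hcl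
        have hstep : pvStep (c, 1) prev t = (c, 1) := by
          simp [pvStep, ht]
        rw [hstep, ih t c 1 h1 (fun _ => rfl), ht]
        rw [pvCntM_cons_eq false 1 t ts ht, pvCntM_false ts (1 + 1) 1]
      · by_cases hcl : cl > 1
        · have hstep : pvStep (c, cl) prev t = (c + 1, 1) := by
            simp [pvStep, ht, hcl]
          rw [hstep, ih t (c + 1) 1 (by omega) (fun _ => rfl), ht]
          rw [pvCntM_cons_ne true cl t ts (by simp [ht])]
          rw [if_pos ⟨rfl, by omega⟩, ht]
          ring
        · have hcl1 : cl = 1 := by omega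
          subst hcl1
          have hstep : pvStep (c, 1) prev t = (c, 1) := by
            simp [pvStep, ht]
          rw [hstep, ih t c 1 h1 (fun _ => rfl), ht]
          rw [pvCntM_cons_ne true 1 t ts (by simp [ht])]
          rw [if_neg (fun h => absurd h.2 (by omega)), ht]
          ring
    · -- current token is punctuation
      cases hp : pvIsPunct prev
      · -- quirk branch: punctuation token after a non-punctuation one; state unchanged
        have hcl : cl = 1 := h2 hp
        subst hcl
        have hstep : pvStep (c, 1) prev t = (c, 1) := by
          simp [pvStep, ht, hp]
        rw [hstep, ih t c 1 h1 (by simp [ht]), ht]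
        rw [pvCntM_cons_ne false 1 t ts (by simp [ht]), ht]
        rw [if_neg (fun h => nomatch h.1)]
        ring
      · -- run continues
        have hstep : pvStep (c, cl) prev t = (c, cl + 1) := by
          simp [pvStep, ht, hp]
        rw [hstep, ih t c (cl + 1) (by omega) (by simp [ht]), ht]
        rw [pvCntM_cons_eq true cl t ts ht]

-- A's indexed loop over range(1, len) equals pvFoldA on the suffix after the first token.
theorem pvRange_eq (ts : List String) : ∀ (front : List String) (prev : String) (st : Int × Int),
    (PySem.List.pyRange (front.length + 1) ((front ++ prev :: ts).length) 1).foldl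
      (fun (st : Int × Int) i =>
        let token := PySem.List.pyGetD (front ++ prev :: ts) i ""
        if !(pvIsPunct token) then
          (if st.2 > 1 then (st.1 + 1, 1) else st)
        else if pvIsPunct (PySem.List.pyGetD (front ++ prev :: ts) (i - 1) "") then
          (st.1, st.2 + 1)
        else st) st = pvFoldA st prev ts := by
  induction ts with
  | nil =>
    intro front prev st
    rw [PySem.List.pyRange_one_eq_nil (by simp)]
    simp [pvFoldA]
  | cons t ts ih =>
    intro front prev st
    rw [PySem.List.pyRange_one_cons (by simp)]
    simp only [List.foldl_cons]
    have hcur : PySem.List.pyGetD (front ++ prev :: t :: ts) ((front.length : Int) + 1) "" = t := by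
      rw [show ((front.length : Int) + 1) = ((front.length + 1 : Nat) : Int) by push_cast; ring]
      rw [PySem.List.pyGetD_natCast]
      rw [List.getD_eq_getElem?_getD, List.getElem?_append_right (by omega)]
      simp
    have hprev : PySem.List.pyGetD (front ++ prev :: t :: ts) ((front.length : Int) + 1 - 1) "" = prev := by
      rw [show ((front.length : Int) + 1 - 1) = ((front.length : Nat) : Int) by ring]
      rw [PySem.List.pyGetD_natCast]
      rw [List.getD_eq_getElem?_getD, List.getElem?_append_right (by omega)]
      simp
    rw [hcur, hprev]
    have h2 := ih (front ++ [prev]) t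
      (if !(pvIsPunct t) then (if st.2 > 1 then (st.1 + 1, 1) else st)
       else if pvIsPunct prev then (st.1, st.2 + 1) else st)
    simp only [List.append_assoc, List.cons_append, List.nil_append, List.length_append,
      List.length_cons, List.length_nil] at h2 ⊢
    rw [show ((front.length : Int) + 1 + 1) = ((front.length + 1 : Nat) : Int) + 1 by push_cast; ring]
    rw [h2]
    simp [pvFoldA, pvStep]

-- ===== VERDICT (by name: the statement is the Claim_ definition above) =====
theorem get_cont_punct_count_spec : Claim_equal_get_cont_punct_count := by
  intro tokens _
  unfold Spec_get_cont_punct_count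
  cases tokens with
  | nil => decide
  | cons t ts =>
    have e1 : get_cont_punct_count (t :: ts)
        = (if (pvFoldA (0, 1) t ts).2 > 1 then (pvFoldA (0, 1) t ts).1 + 1
           else (pvFoldA (0, 1) t ts).1) :=
      congrArg (fun st : Int × Int => if st.2 > 1 then st.1 + 1 else st.1)
        (pvRange_eq ts [] t (0, 1))
    have e2 : get_cont_punct_count_alt (t :: ts)
        = (((pvMergeRuns (pvIsPunct t) 1 ts).filter (fun r => r.1 && decide (2 ≤ r.2))).length : Int) :=
      congrArg (fun runs : List (Bool × Int) =>
          ((runs.filter (fun r => r.1 && decide (2 ≤ r.2))).length : Int))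
        (pvFoldB_eq ts [] (pvIsPunct t) 1)
    rw [e1, e2, pvFoldA_eq ts t 0 1 (by omega) (fun _ => rfl)]
    simp [pvCntM]
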